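-- pv_equiv track=rewrite | github.com/Biggunlotsoffun/FarkleProject | controller_2.py | four_plus_pair
-- ===== SOURCE A (Python) =====
-- def four_plus_pair(dice_roll):
--     #dice_roll = self.rand_int_list
--     four_pair_score = 0
--     four_pair_dict = {}
--     has_pair = False
--     for i in dice_roll:
--         four_pair_dict[i] = four_pair_dict.get(i, 0) + 1
--     for keys, values in four_pair_dict.items():
--         if values == 4 and any(val == 2 for val in four_pair_dict.values()):
--             four_pair_score = 1500
--             has_pair = True
--     if has_pair:
--         return four_pair_score, True
--     else:
--         return 0, False
-- ===== SOURCE B (Python) =====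
-- def four_plus_pair(dice_roll):
--     s = sorted(dice_roll)
--     runs = []
--     i = 0
--     n = len(s)
--     while i < n:
--         j = i
--         while j < n and s[j] == s[i]:
--             j += 1
--         runs.append(j - i)
--         i = j
--     return (1500, True) if 4 in runs and 2 in runs else (0, False)
-- ===== Notes on version B (the rewrite author's own statement) =====
-- stated objective: idiomatic
-- what changed: Replaced A's hash-map tally plus a nested any()-scan re-evaluated inside the items loop by sorting a copy of the roll, collecting the lengths of runs of equal consecutive values in one scan, and testing whether 4 and 2 are among the run lengths.
import Mathlib
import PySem

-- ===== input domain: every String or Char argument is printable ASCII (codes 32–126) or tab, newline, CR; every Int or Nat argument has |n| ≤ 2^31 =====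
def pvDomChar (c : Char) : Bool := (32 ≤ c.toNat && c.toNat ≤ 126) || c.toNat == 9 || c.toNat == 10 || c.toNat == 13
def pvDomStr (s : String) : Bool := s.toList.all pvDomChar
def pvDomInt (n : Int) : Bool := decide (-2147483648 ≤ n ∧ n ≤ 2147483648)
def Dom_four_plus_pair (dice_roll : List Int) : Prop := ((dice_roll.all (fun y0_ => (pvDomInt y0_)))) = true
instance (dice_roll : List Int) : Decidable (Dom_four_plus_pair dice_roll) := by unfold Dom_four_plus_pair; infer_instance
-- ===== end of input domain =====

-- B replaces A's dict tally plus nested any()-scan by sort-then-group-runs and a membership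
-- check on run lengths (objective: alternative/idiomatic; same asymptotic class up to the sort).


-- ===== PORT A =====
def four_plus_pair (dice_roll : List Int) : Int × Bool :=
  -- four_pair_score = 0; four_pair_dict = {}; has_pair = False
  -- for i in dice_roll: four_pair_dict[i] = four_pair_dict.get(i, 0) + 1
  let d := dice_roll.foldl (fun d i => d.insert i (d.getD i 0 + 1))
             (PySem.Dict.empty : PySem.Dict Int Int)
  -- for keys, values in four_pair_dict.items(): if values == 4 and any(val == 2 …): …
  let st := d.items.foldl
      (fun (st : Int × Bool) kv =>
        if kv.2 == 4 && d.values.any (fun val => val == 2) then ((1500 : Int), true) else st)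
      ((0 : Int), false)
  -- if has_pair: return four_pair_score, True  else: return 0, False
  if st.2 then (st.1, true) else ((0 : Int), false)

-- ===== PORT B =====
-- the outer while loop of Source B: each step consumes one run of equal values (j advances
-- past the elements equal to s[i]) and records its length j - i
def fppRuns (s : List Int) : List Int :=
  match s with
  | [] => []
  | x :: rest =>
      ((1 : Int) + ((rest.takeWhile (fun y => y == x)).length : Int)) ::
        fppRuns (rest.dropWhile (fun y => y == x))
termination_by s.length
decreasing_by
  simp only [List.length_cons]
  exact Nat.lt_succ_of_le (List.length_dropWhile_le _ _)

def four_plus_pair_alt (dice_roll : List Int) : Int × Bool :=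
  let runs := fppRuns (PySem.List.sorted dice_roll (fun x => x) false)
  if runs.contains 4 && runs.contains 2 then ((1500 : Int), true) else ((0 : Int), false)

-- ===== PRECONDITION & SPEC =====
def Spec_four_plus_pair (dice_roll : List Int) (out : Int × Bool) : Prop := out = four_plus_pair_alt dice_roll
instance (dice_roll : List Int) (out : Int × Bool) : Decidable (Spec_four_plus_pair dice_roll out) := by unfold Spec_four_plus_pair; infer_instance

-- ===== CLAIM (what is proved, stated in full; the proofs are below) =====
def Claim_equal_four_plus_pair : Prop := ∀ (dice_roll : List Int), Dom_four_plus_pair dice_roll → Spec_four_plus_pair dice_roll (four_plus_pair dice_roll)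

-- ===== LEMMAS AND PROOFS =====

-- A's second loop: either keeps the state or resets it to the constant c
lemma foldl_keep_or_const {α : Type} (l : List α) (p : α → Bool) (c init : Int × Bool) :
    l.foldl (fun st kv => if p kv then c else st) init
      = if l.any p then c else init := by
  induction l generalizing init with
  | nil => simp
  | cons y l ih =>
      by_cases hy : p y = true
      · simp [List.foldl_cons, hy, ih, ite_self]
      · simp [List.foldl_cons, hy, ih]

lemma any_and_const {α : Type} (l : List α) (p : α → Bool) (c : Bool) :
    l.any (fun x => p x && c) = (l.any p && c) := by
  cases c <;> simp

-- in a ≤-sorted list x :: rest, everything after the initial run of x's differs from x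
lemma mem_dropWhile_ne {x : Int} {rest : List Int}
    (h : (x :: rest).Pairwise (· ≤ ·)) :
    ∀ y ∈ rest.dropWhile (fun y => y == x), y ≠ x := by
  intro y hy
  cases hdr : rest.dropWhile (fun y => y == x) with
  | nil => simp [hdr] at hy
  | cons h0 tl =>
      have hne : (rest.dropWhile (fun y => y == x)) ≠ [] := by simp [hdr]
      have hhead := List.head_dropWhile_not (fun y => y == x) hne
      have hh0 : h0 ≠ x := by
        have h1 : (rest.dropWhile (fun y => y == x)).head? = some h0 := by rw [hdr]; rfl
        rw [List.head?_eq_some_head hne] at h1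
        rw [Option.some.inj h1] at hhead
        simpa using hhead
      have hrest : ∀ z ∈ rest, x ≤ z := (List.pairwise_cons.mp h).1
      have hxh0 : x < h0 := by
        have hmem : h0 ∈ rest.dropWhile (fun y => y == x) := by
          rw [hdr]; exact List.mem_cons_self
        exact lt_of_le_of_ne (hrest h0 ((List.dropWhile_sublist _).mem hmem)) (Ne.symm hh0)
      have hpw : (h0 :: tl).Pairwise (fun a b : Int => a ≤ b) := by
        have := List.Pairwise.sublist (List.dropWhile_sublist (fun y => y == x))
          (List.pairwise_cons.mp h).2
        simpa [hdr] using this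
      rw [hdr] at hy
      rcases List.mem_cons.mp hy with rfl | hytl
      · exact Ne.symm (ne_of_lt hxh0)
      · have : h0 ≤ y := (List.pairwise_cons.mp hpw).1 y hytl
        exact Ne.symm (ne_of_lt (lt_of_lt_of_le hxh0 this))

-- run lengths of a sorted list = the multiset of counts (as a membership statement)
lemma mem_fppRuns {l : List Int} (h : l.Pairwise (· ≤ ·)) (n : Int) :
    n ∈ fppRuns l ↔ ∃ x ∈ l, (l.count x : Int) = n := by
  induction l using fppRuns.induct with
  | case1 => simp [fppRuns]
  | case2 x rest ih =>
      have hpc := List.pairwise_cons.mp h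
      have hdsub : (rest.dropWhile (fun y => y == x)).Sublist rest := List.dropWhile_sublist _
      have hpd : (rest.dropWhile (fun y => y == x)).Pairwise (fun a b : Int => a ≤ b) :=
        List.Pairwise.sublist hdsub hpc.2
      have hdne := mem_dropWhile_ne h
      have htw : ∀ y ∈ rest.takeWhile (fun y => y == x), y = x := by
        intro y hy; simpa using List.mem_takeWhile_imp hy
      have hsplit : rest.takeWhile (fun y => y == x) ++ rest.dropWhile (fun y => y == x) = rest :=
        List.takeWhile_append_dropWhile
      -- count of the head = 1 + initial run length
      have hcx : (x :: rest).count x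
          = 1 + (rest.takeWhile (fun y => y == x)).length := by
        rw [List.count_cons_self]
        conv_lhs => rw [← hsplit]
        rw [List.count_append]
        have h1 : (rest.takeWhile (fun y => y == x)).count x
            = (rest.takeWhile (fun y => y == x)).length := by
          rw [List.count_eq_length]; intro b hb; simpa using (htw b hb).symm
        have h2 : (rest.dropWhile (fun y => y == x)).count x = 0 :=
          List.count_eq_zero.mpr (fun hx => hdne x hx rfl)
        omega
      -- counts of later elements are unaffected by the initial run
      have hcy : ∀ y ∈ rest.dropWhile (fun y => y == x),
          (x :: rest).count y = (rest.dropWhile (fun y => y == x)).count y := by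
        intro y hy
        have hyx : y ≠ x := hdne y hy
        rw [List.count_cons]
        conv_lhs => rw [← hsplit]
        rw [List.count_append]
        have h1 : (rest.takeWhile (fun y => y == x)).count y = 0 :=
          List.count_eq_zero.mpr (fun hc => hyx (htw y hc))
        simp [h1, Ne.symm hyx]
      constructor
      · intro hn
        rw [fppRuns] at hn
        rcases List.mem_cons.mp hn with rfl | hn
        · exact ⟨x, List.mem_cons_self, by rw [hcx]; push_cast; ring⟩
        · rcases (ih hpd).mp hn with ⟨y, hy, hcnt⟩
          refine ⟨y, List.mem_cons_of_mem _ (hdsub.mem hy), ?_⟩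
          rw [hcy y hy]; exact hcnt
      · rintro ⟨y, hy, hcnt⟩
        rw [fppRuns]
        by_cases hyx : y = x
        · subst hyx
          apply List.mem_cons.mpr; left
          rw [hcx] at hcnt; push_cast at hcnt ⊢; omega
        · have hyrest : y ∈ rest := (List.mem_cons.mp hy).resolve_left hyx
          have hyd : y ∈ rest.dropWhile (fun y => y == x) := by
            rw [← hsplit] at hyrest
            rcases List.mem_append.mp hyrest with hyt | hyd
            · exact absurd (htw y hyt) hyx
            · exact hyd
          apply List.mem_cons.mpr; right
          exact (ih hpd).mpr ⟨y, hyd, by rw [← hcy y hyd]; exact hcnt⟩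

-- B's condition "n ∈ runs" in terms of counts of the original list
lemma contains_runs_iff (xs : List Int) (n : Int) :
    ((fppRuns (PySem.List.sorted xs (fun x => x) false)).contains n = true)
      ↔ ∃ x ∈ xs, (xs.count x : Int) = n := by
  have hperm : (PySem.List.sorted xs (fun x => x) false).Perm xs := PySem.List.sorted_perm ..
  have hpw : (PySem.List.sorted xs (fun x => x) false).Pairwise (fun a b : Int => a ≤ b) :=
    PySem.List.sorted_pairwise ..
  rw [List.contains_iff_mem, mem_fppRuns hpw]
  constructor
  · rintro ⟨x, hx, hc⟩
    exact ⟨x, hperm.mem_iff.mp hx, by rw [← hperm.count_eq]; exact hc⟩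
  · rintro ⟨x, hx, hc⟩
    exact ⟨x, hperm.mem_iff.mpr hx, by rw [hperm.count_eq]; exact hc⟩

-- A's condition "some dict value equals n" in terms of counts of the original list
lemma counter_any_iff (xs : List Int) (n : Int) :
    (((PySem.Dict.counter xs).items.any (fun kv => kv.2 == n)) = true)
      ↔ ∃ x ∈ xs, (xs.count x : Int) = n := by
  rw [PySem.Dict.items_counter]
  simp only [List.any_map, List.any_eq_true, Function.comp]
  constructor
  · rintro ⟨k, hk, hkn⟩
    exact ⟨k, (PySem.Set.mem_ofList _ _).mp hk, by simpa using hkn⟩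
  · rintro ⟨k, hk, hkn⟩
    exact ⟨k, (PySem.Set.mem_ofList _ _).mpr hk, by simpa using hkn⟩

lemma four_plus_pair_eq_alt (xs : List Int) :
    four_plus_pair xs = four_plus_pair_alt xs := by
  simp only [four_plus_pair, four_plus_pair_alt]
  rw [PySem.Dict.foldl_insert_getD_add_one_eq_counter]
  rw [foldl_keep_or_const]
  have hval : (PySem.Dict.counter xs).values.any (fun val => val == (2 : Int))
      = (PySem.Dict.counter xs).items.any (fun kv => kv.2 == (2 : Int)) := by
    simp only [PySem.Dict.values, List.any_map]; rfl
  have hb4 := counter_any_iff xs 4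
  have hb2 := counter_any_iff xs 2
  have hr4 := contains_runs_iff xs 4
  have hr2 := contains_runs_iff xs 2
  have h4 : ((PySem.Dict.counter xs).items.any (fun kv => kv.2 == (4 : Int)))
      = (fppRuns (PySem.List.sorted xs (fun x => x) false)).contains 4 := by
    rw [Bool.eq_iff_iff, hb4, hr4]
  have h2 : ((PySem.Dict.counter xs).items.any (fun kv => kv.2 == (2 : Int)))
      = (fppRuns (PySem.List.sorted xs (fun x => x) false)).contains 2 := by
    rw [Bool.eq_iff_iff, hb2, hr2]
  rw [any_and_const, hval, h4, h2]
  rcases hcb : ((fppRuns (PySem.List.sorted xs (fun x => x) false)).contains 4 &&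
      (fppRuns (PySem.List.sorted xs (fun x => x) false)).contains 2) <;>
    simp

-- ===== VERDICT (by name: the statement is the Claim_ definition above) =====
theorem four_plus_pair_spec : Claim_equal_four_plus_pair := by
  intro xs _
  unfold Spec_four_plus_pair
  exact four_plus_pair_eq_alt xs
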